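-- pv_equiv track=rewrite | github.com/ViralMehtaSWE/Scrapy-Spider-Autorepair | auto_repair_code.py | remove_tag_attributes
-- ===== SOURCE A (Python) =====
-- from enum import Enum
--
-- class State(Enum):
--     wait_for_open_angular_bracket = 0
--     wait_for_non_whitespace = 1
--     wait_for_whitespace_or_close_angular_bracket = 2
--     wait_for_close_angular_bracket = 3
--
-- def remove_tag_attributes(code):
--     """
--         This function removes tag attributes from HTML tags.
--         Parameters:
--             1. code(type = string)
--         Example:
--             >>> path = 'Examples/Hello_World.html'
--             >>> obj = Page(path, 'html')
--             >>> code = '<div id = "ID"> Hello World </div>'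
--             >>> obj.remove_tag_attributes(code)
--             '<div> Hello World </div>'
--             >>>
--     """
--     lst = []
--     state = State.wait_for_open_angular_bracket
--     for ch in code:
--         if(state == State.wait_for_open_angular_bracket):
--             lst.append(ch)
--             if ch == '<':
--                 state = State.wait_for_non_whitespace
--         elif(state == State.wait_for_non_whitespace):
--             if not ch.isspace():
--                 lst.append(ch)
--                 state = State.wait_for_whitespace_or_close_angular_bracket
--         elif(state == State.wait_for_whitespace_or_close_angular_bracket):
--             if ch == '>':
--                 state = State.wait_for_open_angular_bracket
--                 lst.append(ch)
--             elif not ch.isspace():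
--                 lst.append(ch)
--             else:
--                 state = State.wait_for_close_angular_bracket
--         elif(state == State.wait_for_close_angular_bracket):
--             if ch == '>':
--                 state = State.wait_for_open_angular_bracket
--                 lst.append(ch)
--     code = ''.join(lst)
--     return code
-- ===== SOURCE B (Python) =====
-- def remove_tag_attributes(code):
--     out = []
--     i, n = 0, len(code)
--     while i < n:
--         c = code[i]
--         out.append(c)
--         i += 1
--         if c == '<':
--             # skip whitespace after '<'
--             while i < n and code[i].isspace():
--                 i += 1
--             if i < n:
--                 # first non-whitespace char of the tag (kept even if it is '>')
--                 out.append(code[i])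
--                 i += 1
--                 while i < n:
--                     c = code[i]
--                     i += 1
--                     if c == '>':
--                         out.append('>')
--                         break
--                     if not c.isspace():
--                         out.append(c)
--                     else:
--                         # attributes start here: skip to the closing '>'
--                         while i < n and code[i] != '>':
--                             i += 1
--                         if i < n:
--                             out.append('>')
--                             i += 1
--                         break
--     return ''.join(out)
-- ===== Notes on version B (the rewrite author's own statement) =====
-- stated objective: simpler
-- what changed: Replaces the State-enum state machine (enum class plus a four-way if/elif dispatch per character) with an index-based scanner of nested loops: an outer copy loop and, after each '<', inner loops that skip whitespace, keep the tag name, and skip attributes up to '>'.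
import Mathlib
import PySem

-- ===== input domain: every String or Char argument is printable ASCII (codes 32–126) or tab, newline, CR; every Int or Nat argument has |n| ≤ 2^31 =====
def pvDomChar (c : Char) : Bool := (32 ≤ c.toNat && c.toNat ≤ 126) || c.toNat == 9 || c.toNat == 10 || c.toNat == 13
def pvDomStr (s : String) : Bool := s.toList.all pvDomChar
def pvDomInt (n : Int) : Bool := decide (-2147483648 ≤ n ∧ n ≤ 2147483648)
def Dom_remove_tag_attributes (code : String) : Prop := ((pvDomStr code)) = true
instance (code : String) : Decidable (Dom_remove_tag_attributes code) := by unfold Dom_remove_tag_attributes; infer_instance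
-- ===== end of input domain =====

-- B replaces A's State-enum machine by nested scanning loops (same single left-to-right pass, plainer code); objective: simpler.

-- ===== PORT A =====
-- A's State enum
inductive AState : Type
  | wait_for_open_angular_bracket
  | wait_for_non_whitespace
  | wait_for_whitespace_or_close_angular_bracket
  | wait_for_close_angular_bracket
deriving DecidableEq, Repr

-- one iteration of A's for-loop body: (lst, state) updated by ch
def stepA (st : List Char × AState) (ch : Char) : List Char × AState :=
  match st with
  | (lst, AState.wait_for_open_angular_bracket) =>
      (lst ++ [ch], if ch = '<' then AState.wait_for_non_whitespace
                    else AState.wait_for_open_angular_bracket)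
  | (lst, AState.wait_for_non_whitespace) =>
      if ¬ PySem.Chars.isspace ch then
        (lst ++ [ch], AState.wait_for_whitespace_or_close_angular_bracket)
      else (lst, AState.wait_for_non_whitespace)
  | (lst, AState.wait_for_whitespace_or_close_angular_bracket) =>
      if ch = '>' then (lst ++ [ch], AState.wait_for_open_angular_bracket)
      else if ¬ PySem.Chars.isspace ch then
        (lst ++ [ch], AState.wait_for_whitespace_or_close_angular_bracket)
      else (lst, AState.wait_for_close_angular_bracket)
  | (lst, AState.wait_for_close_angular_bracket) =>
      if ch = '>' then (lst ++ [ch], AState.wait_for_open_angular_bracket)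
      else (lst, AState.wait_for_close_angular_bracket)

def remove_tag_attributes (code : String) : String :=
  String.mk (code.toList.foldl stepA ([], AState.wait_for_open_angular_bracket)).1

-- ===== PORT B =====
-- B's nested while loops, each ported as a recursion over the remaining characters
mutual
  -- outer loop: copy chars; on '<' enter the tag loops
  def bScan : List Char → List Char
    | [] => []
    | c :: rest => c :: (if c = '<' then bAfterLt rest else bScan rest)
  -- inner loop 1: skip whitespace after '<'; keep the first non-whitespace char
  def bAfterLt : List Char → List Char
    | [] => []
    | c :: rest => if PySem.Chars.isspace c then bAfterLt rest else c :: bBody rest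
  -- inner loop 2: copy the tag name, stop at '>' or at the first whitespace
  def bBody : List Char → List Char
    | [] => []
    | c :: rest =>
        if c = '>' then '>' :: bScan rest
        else if ¬ PySem.Chars.isspace c then c :: bBody rest
        else bSkipGt rest
  -- inner loop 3: drop the attributes up to the closing '>'
  def bSkipGt : List Char → List Char
    | [] => []
    | c :: rest => if c = '>' then '>' :: bScan rest else bSkipGt rest
end

def remove_tag_attributes_alt (code : String) : String :=
  String.mk (bScan code.toList)

-- ===== PRECONDITION & SPEC =====
def Spec_remove_tag_attributes (code : String) (out : String) : Prop := out = remove_tag_attributes_alt code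
instance (code : String) (out : String) : Decidable (Spec_remove_tag_attributes code out) := by unfold Spec_remove_tag_attributes; infer_instance

-- ===== CLAIM (what is proved, stated in full; the proofs are below) =====
def Claim_equal_remove_tag_attributes : Prop := ∀ (code : String), Dom_remove_tag_attributes code → Spec_remove_tag_attributes code (remove_tag_attributes code)

-- ===== LEMMAS AND PROOFS =====

-- which of B's loops corresponds to each of A's states
def phaseB (st : AState) : List Char → List Char :=
  match st with
  | AState.wait_for_open_angular_bracket => bScan
  | AState.wait_for_non_whitespace => bAfterLt
  | AState.wait_for_whitespace_or_close_angular_bracket => bBody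
  | AState.wait_for_close_angular_bracket => bSkipGt

theorem foldl_stepA_eq_phaseB (cs : List Char) :
    ∀ (acc : List Char) (st : AState),
      (cs.foldl stepA (acc, st)).1 = acc ++ phaseB st cs := by
  induction cs with
  | nil => intro acc st; simp [phaseB]
          <;> cases st <;> simp [bScan, bAfterLt, bBody, bSkipGt]
  | cons c rest ih =>
      intro acc st
      cases st <;>
        simp only [List.foldl_cons, stepA, phaseB, bScan, bAfterLt, bBody, bSkipGt] <;>
        split_ifs <;>
        simp_all [phaseB, ih]

theorem remove_tag_attributes_eq_alt (code : String) :
    remove_tag_attributes code = remove_tag_attributes_alt code := by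
  unfold remove_tag_attributes remove_tag_attributes_alt
  rw [foldl_stepA_eq_phaseB]
  simp [phaseB]

-- ===== VERDICT (by name: the statement is the Claim_ definition above) =====
theorem remove_tag_attributes_spec : Claim_equal_remove_tag_attributes := by
  intro code _
  unfold Spec_remove_tag_attributes
  exact remove_tag_attributes_eq_alt code
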